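-- pv_equiv track=rewrite | github.com/antonioIannotta/ceasar-s-cipher | cipher/__init__.py | produce_decryption_alphabet
-- ===== SOURCE A (Python) =====
-- original_alphabet: dict = {
--     'a': 0, 'b': 1, 'c': 2, 'd': 3, 'e': 4, 'f': 5, 'g': 6, 'h': 7, 'i': 8, 'j': 9, 'k': 10, 'l': 11, 'm': 12,
--     'n': 13, 'o': 14, 'p': 15, 'q': 16, 'r': 17, 's': 18, 't': 19, 'u': 20, 'v': 21, 'w': 22, 'x': 23, 'y': 24, 'z': 25
-- }
--
-- def produce_decryption_alphabet(encrypted_alphabet: dict, key: int) -> dict: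
--     """
--     This method, given the encrypted alphabet, produces the correspondent decrypted one
--     :param encrypted_alphabet: the alphabet to decrypt
--     :param key: the key to decrypt the alphabet
--     :return:
--     """
--     shifted_alphabet = {}
--     for key_dict, item_dict in original_alphabet.items():
--         item: int = (original_alphabet[key_dict] - key) % 26
--         for key_val, item_val in encrypted_alphabet.items():
--             if item_val == item:
--                 shifted_alphabet[key_val] = item_dict
--
--     return shifted_alphabet
-- ===== SOURCE B (Python) =====
-- def produce_decryption_alphabet(encrypted_alphabet: dict, key: int) -> dict:
--     # Bucket sort: one pass over encrypted_alphabet dropping each key into the bucket of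
--     # its decrypted letter index (v + key) % 26 (values outside 0..25 never match any
--     # letter), then emit the buckets in letter order. No scan of original_alphabet at all.
--     buckets = [[] for _ in range(26)]
--     for k, v in encrypted_alphabet.items():
--         if 0 <= v < 26:
--             buckets[(v + key) % 26].append(k)
--     return {k: i for i in range(26) for k in buckets[i]}
-- ===== Notes on version B (the rewrite author's own statement) =====
-- stated objective: faster
-- what changed: B is a bucket sort: one pass over encrypted_alphabet drops each key into the bucket of its decrypted index (v+key)%26 (values outside 0..25 match no letter), and the buckets are emitted in order 0..25 — replacing A's 26 full scans of encrypted_alphabet and its lookups in original_alphabet, which B never touches.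
import Mathlib
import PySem

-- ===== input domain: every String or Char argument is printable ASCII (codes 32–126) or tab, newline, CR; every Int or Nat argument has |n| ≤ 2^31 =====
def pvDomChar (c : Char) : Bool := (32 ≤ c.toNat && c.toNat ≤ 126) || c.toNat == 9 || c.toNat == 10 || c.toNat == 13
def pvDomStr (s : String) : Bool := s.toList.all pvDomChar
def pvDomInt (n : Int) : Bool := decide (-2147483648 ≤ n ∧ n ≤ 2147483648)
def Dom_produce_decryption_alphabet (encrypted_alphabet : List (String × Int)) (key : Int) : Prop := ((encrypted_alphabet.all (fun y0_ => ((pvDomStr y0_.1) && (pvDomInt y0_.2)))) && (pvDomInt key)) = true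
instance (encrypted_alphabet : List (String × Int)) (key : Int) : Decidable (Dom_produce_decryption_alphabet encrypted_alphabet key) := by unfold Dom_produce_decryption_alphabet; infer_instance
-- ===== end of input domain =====

-- B replaces A's 26 scans of encrypted_alphabet by a bucket sort: one pass filling 26 buckets
-- by the closed-form decrypted index (v + key) % 26, then emitting the buckets in order (objective: faster, constant factor).

-- the module constant original_alphabet, as a PySem.Dict literal (used only by port A)
def originalAlphabet : PySem.Dict String Int := PySem.Dict.ofList
  [("a", 0), ("b", 1), ("c", 2), ("d", 3), ("e", 4), ("f", 5), ("g", 6), ("h", 7), ("i", 8),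
   ("j", 9), ("k", 10), ("l", 11), ("m", 12), ("n", 13), ("o", 14), ("p", 15), ("q", 16),
   ("r", 17), ("s", 18), ("t", 19), ("u", 20), ("v", 21), ("w", 22), ("x", 23), ("y", 24), ("z", 25)]

-- ===== PORT A =====
-- original_alphabet[key_dict] ported with getD: the key comes from original_alphabet.items(), so KeyError is impossible
def produce_decryption_alphabet (encrypted_alphabet : List (String × Int)) (key : Int) : List (String × Int) :=
  (originalAlphabet.items.foldl (fun shifted kd =>
      let item : Int := PySem.Int.mod (originalAlphabet.getD kd.1 0 - key) 26
      encrypted_alphabet.foldl (fun sh p => if p.2 == item then sh.insert p.1 kd.2 else sh) shifted)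
    PySem.Dict.empty).items

-- ===== PORT B =====
-- buckets[(v+key)%26] indexing is always in range (0 ≤ x % 26 < 26), ported with set/getD at the .toNat index (exact here)
def produce_decryption_alphabet_alt (encrypted_alphabet : List (String × Int)) (key : Int) : List (String × Int) :=
  let buckets : List (List String) :=
    encrypted_alphabet.foldl
      (fun bs p =>
        if 0 ≤ p.2 ∧ p.2 < 26 then
          bs.set (PySem.Int.mod (p.2 + key) 26).toNat
            (bs.getD (PySem.Int.mod (p.2 + key) 26).toNat [] ++ [p.1])
        else bs)
      (List.replicate 26 [])
  ((PySem.List.pyRange 0 26 1).foldl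
      (fun d i => (buckets.getD i.toNat []).foldl (fun d k => d.insert k i) d)
      PySem.Dict.empty).items

-- ===== PRECONDITION & SPEC =====
def Spec_produce_decryption_alphabet (encrypted_alphabet : List (String × Int)) (key : Int) (out : List (String × Int)) : Prop := out = produce_decryption_alphabet_alt encrypted_alphabet key
instance (encrypted_alphabet : List (String × Int)) (key : Int) (out : List (String × Int)) : Decidable (Spec_produce_decryption_alphabet encrypted_alphabet key out) := by unfold Spec_produce_decryption_alphabet; infer_instance

-- ===== CLAIM (what is proved, stated in full; the proofs are below) =====
def Claim_equal_produce_decryption_alphabet : Prop := ∀ (encrypted_alphabet : List (String × Int)) (key : Int), Dom_produce_decryption_alphabet encrypted_alphabet key → Spec_produce_decryption_alphabet encrypted_alphabet key (produce_decryption_alphabet encrypted_alphabet key)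

-- ===== LEMMAS AND PROOFS =====

-- in original_alphabet, looking a key of an item back up returns that item's value
theorem originalAlphabet_getD (kd : String × Int) (h : kd ∈ originalAlphabet.items) :
    originalAlphabet.getD kd.1 0 = kd.2 := by
  revert h
  have : ∀ kd ∈ originalAlphabet.items, originalAlphabet.getD kd.1 0 = kd.2 := by decide
  exact this kd

-- A's filtered scan inserting val equals inserting val for each key of the filtered list
theorem foldl_filter_insert (enc : List (String × Int)) (q : String × Int → Bool) (val : Int)
    (sh : PySem.Dict String Int) :
    enc.foldl (fun sh p => if q p then sh.insert p.1 val else sh) sh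
      = ((enc.filter q).map Prod.fst).foldl (fun sh k => sh.insert k val) sh := by
  induction enc generalizing sh with
  | nil => rfl
  | cons p rest ih =>
    simp only [List.foldl_cons, List.filter_cons]
    by_cases h : q p = true
    · rw [if_pos h, if_pos h, List.map_cons, List.foldl_cons]; exact ih _
    · rw [if_neg h, if_neg h]; exact ih _

-- the bucket-filling pass: bucket j collects, in order, the keys of valid pairs decrypting to j
theorem bucket_fold (key : Int) (enc : List (String × Int)) (bs : List (List String))
    (hlen : bs.length = 26) (j : Nat) (hj : j < 26) :
    (enc.foldl
        (fun bs p =>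
          if 0 ≤ p.2 ∧ p.2 < 26 then
            bs.set (PySem.Int.mod (p.2 + key) 26).toNat
              (bs.getD (PySem.Int.mod (p.2 + key) 26).toNat [] ++ [p.1])
          else bs)
        bs).getD j []
      = bs.getD j []
        ++ (enc.filter (fun p => decide (0 ≤ p.2 ∧ p.2 < 26)
              && (PySem.Int.mod (p.2 + key) 26 == (j : Int)))).map Prod.fst := by
  induction enc generalizing bs with
  | nil => simp
  | cons p rest ih =>
    simp only [List.foldl_cons, List.filter_cons]
    by_cases hv : 0 ≤ p.2 ∧ p.2 < 26
    · rw [if_pos hv]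
      have hm0 : 0 ≤ PySem.Int.mod (p.2 + key) 26 := PySem.Int.mod_nonneg _ (by norm_num)
      have hmlt : PySem.Int.mod (p.2 + key) 26 < 26 := PySem.Int.mod_lt _ (by norm_num)
      have hset : (bs.set (PySem.Int.mod (p.2 + key) 26).toNat
          (bs.getD (PySem.Int.mod (p.2 + key) 26).toNat [] ++ [p.1])).length = 26 := by
        simp [hlen]
      rw [ih _ hset]
      by_cases hji : (PySem.Int.mod (p.2 + key) 26).toNat = j
      · have hj' : PySem.Int.mod (p.2 + key) 26 = (j : Int) := by omega
        rw [PySem.Int.mod_eq_emod_of_pos (by norm_num : (0:Int) < 26)] at hj' 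
        have hcond : (decide (0 ≤ p.2 ∧ p.2 < 26)
            && (PySem.Int.mod (p.2 + key) 26 == (j : Int))) = true := by
          simp [hv, hj']
        rw [hcond, if_pos rfl, List.map_cons]
        rw [List.getD_eq_getElem?_getD, List.getD_eq_getElem?_getD, hji,
          List.getElem?_set_self (by omega), List.getD_eq_getElem?_getD]
        simp
      · have hj' : ¬ PySem.Int.mod (p.2 + key) 26 = (j : Int) := by omega
        rw [PySem.Int.mod_eq_emod_of_pos (by norm_num : (0:Int) < 26)] at hj' 
        have hcond : (decide (0 ≤ p.2 ∧ p.2 < 26)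
            && (PySem.Int.mod (p.2 + key) 26 == (j : Int))) = false := by
          simp [hv, hj']
        rw [hcond, if_neg (by simp)]
        rw [List.getD_eq_getElem?_getD, List.getElem?_set_ne hji, ← List.getD_eq_getElem?_getD]
    · rw [if_neg hv, ih _ hlen]
      have hcond : (decide (0 ≤ p.2 ∧ p.2 < 26)
          && (PySem.Int.mod (p.2 + key) 26 == (j : Int))) = false := by
        simp [hv]
      rw [hcond, if_neg (by simp)]

-- A's match condition 'v == (i - key) % 26' is 'v is a valid letter index decrypting to i'
theorem cond_iff (key i : Int) (hi0 : 0 ≤ i) (hi : i < 26) (p : String × Int) :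
    (p.2 == PySem.Int.mod (i - key) 26)
      = (decide (0 ≤ p.2 ∧ p.2 < 26) && (PySem.Int.mod (p.2 + key) 26 == i)) := by
  simp only [PySem.Int.mod_eq_emod_of_pos (by norm_num : (0:Int) < 26)]
  rw [Bool.eq_iff_iff]
  simp only [beq_iff_eq, Bool.and_eq_true, decide_eq_true_eq]
  constructor
  · intro h
    have h1 : 0 ≤ (i - key) % 26 := Int.emod_nonneg _ (by norm_num)
    have h2 : (i - key) % 26 < 26 := Int.emod_lt_of_pos _ (by norm_num)
    exact ⟨⟨by omega, by omega⟩, by omega⟩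
  · rintro ⟨⟨h0, h1⟩, h2⟩
    omega

-- ===== VERDICT (by name: the statement is the Claim_ definition above) =====
theorem produce_decryption_alphabet_spec : Claim_equal_produce_decryption_alphabet := by
  intro enc key _
  unfold Spec_produce_decryption_alphabet produce_decryption_alphabet produce_decryption_alphabet_alt
  congr 1
  -- A's outer loop: replace the original_alphabet lookup by the item's own value,
  -- then view the loop over items as a loop over the indices 0..25
  refine Eq.trans (b := List.foldl (fun (d : PySem.Dict String Int) (kd : String × Int) =>
      enc.foldl (fun sh (p : String × Int) =>
        if p.2 == PySem.Int.mod (kd.2 - key) 26 then sh.insert p.1 kd.2 else sh) d)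
      PySem.Dict.empty originalAlphabet.items) ?_ ?_
  · apply PySem.List.foldl_congr_mem
    intro d kd hmem
    simp only [originalAlphabet_getD kd hmem]
  rw [show originalAlphabet.items = (PySem.List.pyRange 0 26 1).map
        (fun i => ((originalAlphabet.items.map Prod.fst).getD i.toNat "", i)) from by decide,
    List.foldl_map]
  apply PySem.List.foldl_congr_mem
  intro d i hi
  obtain ⟨hi0, hi26⟩ := (PySem.List.mem_pyRange_one).mp hi
  have hiN : ((i.toNat : Int)) = i := Int.toNat_of_nonneg hi0
  rw [foldl_filter_insert, bucket_fold key enc _ (by simp) i.toNat (by omega),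
    List.getD_replicate, List.nil_append]
  congr 2
  apply List.filter_congr
  intro p _
  rw [hiN, cond_iff key i hi0 hi26 p]
  omega
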